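-- pv_equiv track=rewrite | github.com/TDK1969/My-Leetcode | daily/2022.10/915.partition-array-into-disjoint-intervals.py | partitionDisjoint
-- ===== SOURCE A (Python) =====
-- from typing import List
--
-- def partitionDisjoint(nums: List[int]) -> int:
--     n = len(nums)
--     left_max = [nums[0]]
--     right_min = [nums[-1]]
--
--     for i in range(1, n - 1):
--         left_max.append(max(nums[i], left_max[-1]))
--
--     for i in range(n - 2, 0, -1):
--         right_min.append(min(nums[i], right_min[-1]))
--
--     right_min = right_min[::-1]
--
--     for i in range(n - 1):
--         if left_max[i] <= right_min[i]:
--             return i + 1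
-- ===== SOURCE B (Python) =====
-- def partitionDisjoint(nums):
--     # single loop: running prefix max tested against the min of the remaining suffix
--     left = nums[0]
--     for i in range(1, len(nums)):
--         if left <= min(nums[i:]):
--             return i
--         left = max(left, nums[i])
-- ===== Notes on version B (the rewrite author's own statement) =====
-- stated objective: simpler
-- what changed: replaces A's three passes (prefix-max array, suffix-min array built backwards then reversed, final scan) by one loop that keeps a running prefix max and compares it with min() of the remaining suffix
-- outside the precondition, e.g. on partitionDisjoint([2, 1]): A returns None, B returns None; on partitionDisjoint([5]): A returns None, B returns None; on partitionDisjoint([]): A raises IndexError, B raises IndexError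
import Mathlib
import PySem

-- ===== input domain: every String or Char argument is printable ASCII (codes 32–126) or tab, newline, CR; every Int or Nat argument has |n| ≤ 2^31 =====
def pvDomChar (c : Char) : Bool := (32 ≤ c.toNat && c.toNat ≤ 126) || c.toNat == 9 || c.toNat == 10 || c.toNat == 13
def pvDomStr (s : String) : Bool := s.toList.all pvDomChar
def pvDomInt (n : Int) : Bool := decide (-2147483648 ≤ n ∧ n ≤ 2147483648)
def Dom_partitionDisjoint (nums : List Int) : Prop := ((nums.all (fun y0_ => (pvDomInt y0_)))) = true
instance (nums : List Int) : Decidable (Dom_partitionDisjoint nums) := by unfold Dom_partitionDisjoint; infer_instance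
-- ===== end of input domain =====

-- B changes A's structure: one loop with a running prefix max tested against min() of the
-- remaining suffix, instead of A's precomputed prefix-max / suffix-min arrays (objective: simpler).

-- ===== PORT A =====
-- final loop of A: first i in range(n-1) with left_max[i] <= right_min[i] returns i+1;
-- falling off the loop Python returns None (not an int) — excluded by Pre_; the port returns 0 there.
def pvScanA (lm rm : List Int) : List Int → Int
  | [] => 0
  | i :: rest =>
    if PySem.List.pyGetD lm i 0 ≤ PySem.List.pyGetD rm i 0 then i + 1
    else pvScanA lm rm rest

-- nums[0] / nums[-1] raise IndexError on [] — excluded by Pre_; the port defaults to 0 there.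
def partitionDisjoint (nums : List Int) : Int :=
  let n : Int := PySem.List.len nums
  let left_max0 : List Int := [PySem.List.pyGetD nums 0 0]
  let right_min0 : List Int := [PySem.List.pyGetD nums (-1) 0]
  let left_max : List Int :=
    (PySem.List.pyRange 1 (n - 1) 1).foldl
      (fun acc i => acc ++ [max (PySem.List.pyGetD nums i 0) (acc.getLastD 0)]) left_max0
  let right_min : List Int :=
    (PySem.List.pyRange (n - 2) 0 (-1)).foldl
      (fun acc i => acc ++ [min (PySem.List.pyGetD nums i 0) (acc.getLastD 0)]) right_min0
  let right_min' : List Int := right_min.reverse   -- right_min[::-1]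
  pvScanA left_max right_min' (PySem.List.pyRange 0 (n - 1) 1)

-- ===== PORT B =====
-- loop of B over i = 1 .. n-1; `suffix` is nums[i:]; returns 0 where Python B returns None.
def pvGoB (left : Int) (i : Int) : List Int → Int
  | [] => 0
  | x :: rest =>
    if left ≤ (PySem.List.min? (x :: rest) (fun y => y)).getD 0 then i
    else pvGoB (max left x) (i + 1) rest

def partitionDisjoint_alt (nums : List Int) : Int :=
  match nums with
  | [] => 0          -- nums[0]: IndexError, outside Pre_
  | h :: t => pvGoB h 1 t

-- ===== PRECONDITION & SPEC =====
-- Pre_ excludes exactly the inputs on which Python A does not return an int: the empty list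
-- (IndexError on nums[0]) and inputs with no valid partition point (A falls off and returns None).
def Pre_partitionDisjoint (nums : List Int) : Prop :=
  ∃ i ∈ List.range (nums.length - 1),
    ∀ x ∈ nums.take (i + 1), ∀ y ∈ nums.drop (i + 1), x ≤ y
instance (nums : List Int) : Decidable (Pre_partitionDisjoint nums) := by
  unfold Pre_partitionDisjoint; infer_instance

def pvWitness_partitionDisjoint : List Int := [5, 0, 3, 8, 6]

def Spec_partitionDisjoint (nums : List Int) (out : Int) : Prop := out = partitionDisjoint_alt nums
instance (nums : List Int) (out : Int) : Decidable (Spec_partitionDisjoint nums out) := by unfold Spec_partitionDisjoint; infer_instance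

-- ===== CLAIM (what is proved, stated in full; the proofs are below) =====
def Claim_equal_partitionDisjoint : Prop := ∀ (nums : List Int), Dom_partitionDisjoint nums → Pre_partitionDisjoint nums → Spec_partitionDisjoint nums (partitionDisjoint nums)

-- ===== LEMMAS AND PROOFS =====

-- suffix-min list: (sminList t)[j] = min of t.drop j
def sminList : List Int → List Int
  | [] => []
  | x :: r => r.foldl min x :: sminList r

theorem foldl_min_min (l : List Int) (a b : Int) :
    l.foldl min (min a b) = min a (l.foldl min b) := by
  induction l generalizing b with
  | nil => rfl
  | cons y l ih => simp [List.foldl, min_assoc, ih]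

-- getD of the suffix-min list is the min of the corresponding suffix
theorem sminList_getD (t : List Int) (j : Nat) (x : Int) (rest : List Int)
    (hd : t.drop j = x :: rest) : (sminList t).getD j 0 = List.foldl min x rest := by
  induction t generalizing j with
  | nil => simp at hd
  | cons a r ih =>
    cases j with
    | zero =>
      simp only [List.drop_zero] at hd
      cases hd
      rfl
    | succ j =>
      simp only [List.drop_succ_cons] at hd
      simpa [sminList] using ih j hd

-- prefix-max recurrence: max over the first j+1 elements
theorem take_foldl_max_succ (t : List Int) (h : Int) (j : Nat) (hj : j < t.length) :
    (t.take (j + 1)).foldl max h = max ((t.take j).foldl max h) t[j] := by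
  rw [List.take_add_one, List.getElem?_eq_getElem hj, Option.toList_some, List.foldl_append,
      List.foldl_cons, List.foldl_nil]

-- ===== characterisation of A's first loop =====
theorem leftMax_loop (h : Int) (t : List Int) (k : Nat) (hk : k + 1 ≤ t.length) :
    (PySem.List.pyRange 1 ((k + 1 : Nat) : Int) 1).foldl
      (fun acc i => acc ++ [max (PySem.List.pyGetD (h :: t) i 0) (acc.getLastD 0)]) [h]
    = (List.range (k + 1)).map (fun j => (t.take j).foldl max h) := by
  induction k with
  | zero =>
    rw [PySem.List.pyRange_one_eq_nil (by norm_num)]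
    simp
  | succ k ih =>
    have hk' : k + 1 ≤ t.length := by omega
    have hcast : ((k + 1 + 1 : Nat) : Int) = ((k + 1 : Nat) : Int) + 1 := by push_cast; ring
    rw [hcast, PySem.List.pyRange_one_succ_right (by exact_mod_cast Nat.le_add_left 1 k),
        List.foldl_append, ih hk']
    simp only [List.foldl]
    have hget : PySem.List.pyGetD (h :: t) ((k + 1 : Nat) : Int) 0 = t[k]'(by omega) := by
      rw [PySem.List.pyGetD_natCast, List.getD_cons_succ, List.getD_eq_getElem _ _ (by omega)]
    have hlast : ((List.range (k + 1)).map (fun j => (t.take j).foldl max h)).getLastD 0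
        = (t.take k).foldl max h := by
      rw [List.range_succ]
      simp
    rw [hget, hlast]
    conv_rhs => rw [List.range_succ]
    rw [List.map_append]
    congr 1
    simp only [List.map_cons, List.map_nil]
    congr 1
    rw [take_foldl_max_succ t h k (by omega)]
    exact max_comm _ _

-- ===== characterisation of A's second loop =====
theorem rightMin_loop (h : Int) (t : List Int) (j : Nat) (hj : j < t.length) :
    (PySem.List.pyRange (j : Int) 0 (-1)).foldl
      (fun acc i => acc ++ [min (PySem.List.pyGetD (h :: t) i 0) (acc.getLastD 0)])
      ((sminList (t.drop j)).reverse)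
    = (sminList t).reverse := by
  induction j with
  | zero =>
    rw [PySem.List.pyRange_neg_one_eq_nil (by norm_num)]
    simp
  | succ j ih =>
    have hjt : j < t.length := by omega
    have hcast : ((j + 1 : Nat) : Int) = (j : Int) + 1 := by push_cast; ring
    rw [hcast, PySem.List.pyRange_neg_one_cons (by positivity)]
    simp only [List.foldl, add_sub_cancel_right]
    have hget : PySem.List.pyGetD (h :: t) ((j : Int) + 1) 0 = t[j] := by
      rw [← hcast, PySem.List.pyGetD_natCast, List.getD_cons_succ,
          List.getD_eq_getElem _ _ hjt]
    have hdropj : t.drop j = t[j] :: t.drop (j + 1) := List.drop_eq_getElem_cons hjt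
    have hne : t.drop (j + 1) ≠ [] := by
      intro hnil
      have := List.drop_eq_nil_iff.mp hnil
      omega
    rcases hx : t.drop (j + 1) with _ | ⟨y, r2⟩
    · exact absurd hx hne
    · have hstep : ((sminList (t.drop (j + 1))).reverse ++
          [min (PySem.List.pyGetD (h :: t) ((j:Int)+1) 0)
               ((sminList (t.drop (j + 1))).reverse.getLastD 0)])
          = (sminList (t.drop j)).reverse := by
        rw [hget, hdropj, hx]
        have hlast : ((sminList (y :: r2)).reverse).getLastD 0 = List.foldl min y r2 := by
          rw [List.getLastD_eq_getLast?, List.getLast?_reverse]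
          simp [sminList]
        rw [hlast]
        simp only [sminList, List.reverse_cons]
        congr 1
        simp only [List.foldl_cons]
        rw [foldl_min_min]
      rw [hx] at hstep
      rw [hstep]
      exact ih hjt

-- ===== the two scans agree =====
theorem scan_eq (h : Int) (t : List Int) (s : List Int) (j : Nat) (left : Int)
    (hs : t.drop j = s) (hleft : left = (t.take j).foldl max h) :
    pvScanA ((List.range t.length).map (fun j => (t.take j).foldl max h)) (sminList t)
      (PySem.List.pyRange (j : Int) (t.length : Int) 1)
    = pvGoB left ((j : Int) + 1) s := by
  induction s generalizing j left with
  | nil =>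
    have hle : t.length ≤ j := by
      by_contra hlt
      rw [List.drop_eq_getElem_cons (Nat.lt_of_not_le hlt)] at hs
      exact (List.cons_ne_nil _ _) hs
    rw [PySem.List.pyRange_one_eq_nil (by exact_mod_cast hle)]
    rfl
  | cons x rest ih =>
    have hj : j < t.length := by
      by_contra hle
      simp [List.drop_eq_nil_of_le (Nat.le_of_not_lt hle)] at hs
    have hcons := List.drop_eq_getElem_cons hj
    rw [hs] at hcons
    obtain ⟨hx, hrest⟩ := (List.cons.injEq _ _ _ _).mp hcons
    rw [PySem.List.pyRange_one_cons (by exact_mod_cast hj)]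
    show (if PySem.List.pyGetD _ (j : Int) 0 ≤ PySem.List.pyGetD (sminList t) (j : Int) 0
          then (j : Int) + 1 else _) = _
    have hlm : PySem.List.pyGetD
        ((List.range t.length).map (fun j => (t.take j).foldl max h)) (j : Int) 0 = left := by
      rw [PySem.List.pyGetD_natCast, PySem.List.getD_map_range _ _ _ _ hj, hleft]
    have hrm : PySem.List.pyGetD (sminList t) (j : Int) 0 = List.foldl min x rest := by
      rw [PySem.List.pyGetD_natCast]
      exact sminList_getD t j x rest hs
    rw [hlm, hrm]
    show _ = pvGoB left ((j : Int) + 1) (x :: rest)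
    rw [pvGoB, PySem.List.min?_id_cons]
    simp only [Option.getD_some]
    by_cases hc : left ≤ List.foldl min x rest
    · rw [if_pos hc, if_pos hc]
    · rw [if_neg hc, if_neg hc]
      have hc2 : ((j : Int) + 1) = ((j + 1 : Nat) : Int) := by push_cast; ring
      rw [hc2, ih (j + 1) (max left x) hrest.symm ?_]
      rw [take_foldl_max_succ t h j hj, hleft, ← hx]

-- ===== the ports agree on every input =====
theorem ports_agree (nums : List Int) : partitionDisjoint nums = partitionDisjoint_alt nums := by
  match nums with
  | [] => rfl
  | [h] =>
    show partitionDisjoint [h] = partitionDisjoint_alt [h]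
    unfold partitionDisjoint partitionDisjoint_alt
    simp only [PySem.List.len_eq, List.length_singleton]
    norm_num [PySem.List.pyRange_one_eq_nil, PySem.List.pyRange_neg_one_eq_nil]
    rfl
  | h :: x :: t2 =>
    have htne : (x :: t2) ≠ [] := by simp
    have htlen : 1 ≤ (x :: t2).length := by simp
    show partitionDisjoint (h :: x :: t2) = partitionDisjoint_alt (h :: x :: t2)
    generalize hT : x :: t2 = t at htne htlen
    unfold partitionDisjoint
    simp only [PySem.List.len_eq]
    have hn : ((h :: t).length : Int) = (t.length : Int) + 1 := by simp
    rw [hn]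
    have h1 : ((t.length : Int) + 1 - 1) = ((t.length : Nat) : Int) := by ring
    have h2 : ((t.length : Int) + 1 - 2) = ((t.length - 1 : Nat) : Int) := by
      push_cast [htlen]; ring
    rw [h1, h2, PySem.List.pyGetD_zero_cons]
    obtain ⟨k, hk⟩ : ∃ k, t.length = k + 1 := ⟨t.length - 1, by omega⟩
    rw [show ((t.length : Nat) : Int) = ((k + 1 : Nat) : Int) by rw [hk]]
    rw [leftMax_loop h t k (by omega), ← hk]
    have hlast : PySem.List.pyGetD (h :: t) (-1) 0 = t.getLast htne := by
      rw [PySem.List.pyGetD_neg_one _ _ (by simp), List.getLast_cons htne]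
    have hdrop : t.drop (t.length - 1) = [t.getLast htne] := by
      rw [List.drop_eq_getElem_cons (by omega), List.getLast_eq_getElem]
      have : t.drop (t.length - 1 + 1) = [] := List.drop_eq_nil_of_le (by omega)
      rw [this]
    have hinit : [PySem.List.pyGetD (h :: t) (-1) 0]
        = (sminList (t.drop (t.length - 1))).reverse := by
      rw [hlast, hdrop]
      simp [sminList]
    rw [hinit, rightMin_loop h t (t.length - 1) (by omega), List.reverse_reverse, hk]
    rw [show (0 : Int) = ((0 : Nat) : Int) from rfl, ← hk,
        scan_eq h t t 0 h (by simp) (by simp)]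
    rfl

-- ===== VERDICT (by name: the statement is the Claim_ definition above) =====
theorem partitionDisjoint_spec : Claim_equal_partitionDisjoint := by
  intro nums _ _
  unfold Spec_partitionDisjoint
  exact ports_agree nums
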